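-- pv_equiv track=rewrite | github.com/anegij/clusterpython | Cluster_Prediction/UTILS.py | pair_inagentlist
-- ===== SOURCE A (Python) =====
-- def pair_inagentlist(agent_list, pair1,pair2):
--     p1 = pair1[0]
--     p2 = pair2[0]
--     anum1 = 0
--     anum2 = 0
--     for agent in agent_list:
--         pos_ag = agent[0]
--         anum1 = anum1 + (pos_ag==p1)
--         anum2 = anum2 + (pos_ag==p2)
--         # return true/false
--     return anum1,anum2
-- ===== SOURCE B (Python) =====
-- from bisect import bisect_left, bisect_right
--
-- def pair_inagentlist(agent_list, pair1, pair2):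
--     firsts = sorted(agent[0] for agent in agent_list)
--     anum1 = bisect_right(firsts, pair1[0]) - bisect_left(firsts, pair1[0])
--     anum2 = bisect_right(firsts, pair2[0]) - bisect_left(firsts, pair2[0])
--     return anum1, anum2
-- ===== Notes on version B (the rewrite author's own statement) =====
-- stated objective: alternative
-- what changed: Replaces the single counting pass with two scalar accumulators by sorting the agents' first elements and answering each query as bisect_right - bisect_left (binary search for the width of the run of equal keys).
import Mathlib
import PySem

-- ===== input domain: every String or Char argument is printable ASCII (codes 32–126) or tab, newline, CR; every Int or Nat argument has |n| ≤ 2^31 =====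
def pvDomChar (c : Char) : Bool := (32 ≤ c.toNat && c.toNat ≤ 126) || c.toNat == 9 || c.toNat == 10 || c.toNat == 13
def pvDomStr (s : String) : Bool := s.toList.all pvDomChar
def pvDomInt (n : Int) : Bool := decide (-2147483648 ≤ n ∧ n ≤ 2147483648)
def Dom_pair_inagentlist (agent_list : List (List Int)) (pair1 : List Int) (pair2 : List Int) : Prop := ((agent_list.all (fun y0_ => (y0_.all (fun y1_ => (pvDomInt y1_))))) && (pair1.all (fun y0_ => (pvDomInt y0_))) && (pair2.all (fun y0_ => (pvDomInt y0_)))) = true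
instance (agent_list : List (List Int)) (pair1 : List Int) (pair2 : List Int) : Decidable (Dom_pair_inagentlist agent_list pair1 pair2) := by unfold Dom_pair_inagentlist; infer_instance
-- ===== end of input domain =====

-- B replaces A's single counting pass (two scalar accumulators) by sorting the agents'
-- first elements and answering each query by binary search: bisect_right - bisect_left.

-- ===== PORT A =====
-- literal transliteration of A: pyGetD is exact here because Pre_ guarantees the lists are nonempty
def pair_inagentlist (agent_list : List (List Int)) (pair1 : List Int) (pair2 : List Int) : Int × Int :=
  let p1 := PySem.List.pyGetD pair1 0 0
  let p2 := PySem.List.pyGetD pair2 0 0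
  agent_list.foldl
    (fun (s : Int × Int) agent =>
      let pos_ag := PySem.List.pyGetD agent 0 0
      (s.1 + (if pos_ag == p1 then 1 else 0), s.2 + (if pos_ag == p2 then 1 else 0)))
    (0, 0)

-- ===== PORT B =====
def pair_inagentlist_alt (agent_list : List (List Int)) (pair1 : List Int) (pair2 : List Int) : Int × Int :=
  let firsts := PySem.List.sorted (agent_list.map (fun agent => PySem.List.pyGetD agent 0 0)) (fun x => x) false
  let q1 := PySem.List.pyGetD pair1 0 0
  let q2 := PySem.List.pyGetD pair2 0 0
  let anum1 : Int := (PySem.List.bisectRight firsts q1 : Int) - (PySem.List.bisectLeft firsts q1 : Int)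
  let anum2 : Int := (PySem.List.bisectRight firsts q2 : Int) - (PySem.List.bisectLeft firsts q2 : Int)
  (anum1, anum2)

-- ===== PRECONDITION & SPEC =====
-- A indexes pair1[0], pair2[0] and agent[0] for every agent: it raises IndexError
-- (as does B) when pair1, pair2 or any agent is empty, so Pre_ excludes exactly those.
def Pre_pair_inagentlist (agent_list : List (List Int)) (pair1 : List Int) (pair2 : List Int) : Prop :=
  pair1 ≠ [] ∧ pair2 ≠ [] ∧ ∀ agent ∈ agent_list, agent ≠ []
instance (agent_list : List (List Int)) (pair1 : List Int) (pair2 : List Int) : Decidable (Pre_pair_inagentlist agent_list pair1 pair2) := by unfold Pre_pair_inagentlist; infer_instance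

def pvWitness_pair_inagentlist : List (List Int) × List Int × List Int := ([[1, 2], [3], [1]], [1, 0], [3])

def Spec_pair_inagentlist (agent_list : List (List Int)) (pair1 : List Int) (pair2 : List Int) (out : Int × Int) : Prop := out = pair_inagentlist_alt agent_list pair1 pair2
instance (agent_list : List (List Int)) (pair1 : List Int) (pair2 : List Int) (out : Int × Int) : Decidable (Spec_pair_inagentlist agent_list pair1 pair2 out) := by unfold Spec_pair_inagentlist; infer_instance

-- ===== CLAIM (what is proved, stated in full; the proofs are below) =====
def Claim_equal_pair_inagentlist : Prop := ∀ (agent_list : List (List Int)) (pair1 : List Int) (pair2 : List Int), Dom_pair_inagentlist agent_list pair1 pair2 → Pre_pair_inagentlist agent_list pair1 pair2 → Spec_pair_inagentlist agent_list pair1 pair2 (pair_inagentlist agent_list pair1 pair2)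

-- ===== LEMMAS AND PROOFS =====

-- A's loop computes (count of matching firsts, likewise for p2)
theorem pair_foldl_count (l : List (List Int)) (p1 p2 : Int) (s : Int × Int) :
    l.foldl
      (fun (s : Int × Int) agent =>
        let pos_ag := PySem.List.pyGetD agent 0 0
        (s.1 + (if pos_ag == p1 then 1 else 0), s.2 + (if pos_ag == p2 then 1 else 0)))
      s
    = (s.1 + ((l.map (fun agent => PySem.List.pyGetD agent 0 0)).count p1 : Int),
       s.2 + ((l.map (fun agent => PySem.List.pyGetD agent 0 0)).count p2 : Int)) := by
  induction l generalizing s with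
  | nil => simp
  | cons a t ih =>
      simp only [List.foldl_cons, ih, List.map_cons, List.count_cons]
      refine Prod.ext ?_ ?_ <;> (dsimp only; split_ifs <;> push_cast <;> ring)

-- On a sorted list, bisect_right - bisect_left is the number of occurrences of x.
theorem bisect_sub_eq_count (s : List Int) (x : Int) (hs : s.Pairwise (fun a b => a ≤ b)) :
    (PySem.List.bisectRight s x : Int) - (PySem.List.bisectLeft s x : Int) = (s.count x : Int) := by
  obtain ⟨hL1, hL2, hL3⟩ := PySem.List.bisectLeft_spec s x hs
  obtain ⟨hR1, hR2, hR3⟩ := PySem.List.bisectRight_spec s x hs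
  set r1 := PySem.List.bisectLeft s x with hr1
  set r2 := PySem.List.bisectRight s x with hr2
  have hle : r1 ≤ r2 := by
    by_contra h
    have h : r2 < r1 := Nat.lt_of_not_le h
    have hlt : r2 < s.length := lt_of_lt_of_le h hL1
    have h1 := hL2 r2 hlt h
    have h2 := hR3 r2 hlt (le_refl _)
    linarith
  have hdecomp : s = s.take r1 ++ ((s.drop r1).take (r2 - r1) ++ s.drop r2) := by
    have h1 : (s.drop r1).drop (r2 - r1) = s.drop r2 := by
      rw [List.drop_drop]
      congr 1
      omega
    rw [← h1, List.take_append_drop, List.take_append_drop]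
  have hcount : s.count x = ((s.drop r1).take (r2 - r1)).count x := by
    conv_lhs => rw [hdecomp]
    rw [List.count_append, List.count_append]
    have c1 : (s.take r1).count x = 0 := by
      rw [List.count_eq_zero]
      intro hmem
      obtain ⟨j, hj, hjx⟩ := List.mem_iff_getElem.mp hmem
      have hjlen : j < s.length := by
        have := hj; simp [List.length_take] at this; omega
      have hjr1 : j < r1 := by
        have := hj; simp [List.length_take] at this; omega
      have := hL2 j hjlen hjr1
      rw [List.getElem_take] at hjx
      omega
    have c3 : (s.drop r2).count x = 0 := by
      rw [List.count_eq_zero]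
      intro hmem
      obtain ⟨j, hj, hjx⟩ := List.mem_iff_getElem.mp hmem
      have hjlen : r2 + j < s.length := by
        have := hj; simp [List.length_drop] at this; omega
      have := hR3 (r2 + j) hjlen (Nat.le_add_right _ _)
      rw [List.getElem_drop] at hjx
      omega
    omega
  have hmid : ((s.drop r1).take (r2 - r1)).count x = r2 - r1 := by
    have hlenmid : ((s.drop r1).take (r2 - r1)).length = r2 - r1 := by
      simp [List.length_take, List.length_drop]
      omega
    have hall : ∀ b ∈ (s.drop r1).take (r2 - r1), x = b := by
      intro b hmem
      obtain ⟨j, hj, hjx⟩ := List.mem_iff_getElem.mp hmem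
      rw [hlenmid] at hj
      have hjlen : r1 + j < s.length := by omega
      have h1 := hL3 (r1 + j) hjlen (Nat.le_add_right _ _)
      have h2 := hR2 (r1 + j) hjlen (by omega)
      rw [List.getElem_take, List.getElem_drop] at hjx
      omega
    rw [List.count_eq_length.mpr hall, hlenmid]
  rw [hcount, hmid]
  omega

-- ===== VERDICT (by name: the statement is the Claim_ definition above) =====
theorem pair_inagentlist_spec : Claim_equal_pair_inagentlist := by
  intro al p1 p2 _ _
  unfold Spec_pair_inagentlist pair_inagentlist pair_inagentlist_alt
  simp only [pair_foldl_count, Int.zero_add]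
  have hpair : (PySem.List.sorted (al.map (fun agent => PySem.List.pyGetD agent 0 0)) (fun x => x) false).Pairwise (fun a b => a ≤ b) :=
    PySem.List.sorted_pairwise _ _
  have hperm := PySem.List.sorted_perm (al.map (fun agent => PySem.List.pyGetD agent 0 0)) (fun x : Int => x) false
  refine Prod.ext ?_ ?_ <;>
    simp only [bisect_sub_eq_count _ _ hpair, hperm.count_eq]
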